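-- pv_equiv track=rewrite | github.com/Jane11111/Leetcode2021 | MeiTuan03.py | biInsert
-- ===== SOURCE A (Python) =====
-- def biInsert(lst,num):
--     if len(lst) == 0:
--         lst.append(num)
--         return 0
--     if lst[0]>=num:
--         lst.insert(0,num)
--         return 0
--     # elif lst[0] == num:
--     #     return 0
--     if num>lst[-1]:
--         lst.append(num)
--         return lst[-2]
--
--     l = 0
--     h = len(lst)-1
--     while l<h:
--         m = (l+h)//2
--         if lst[m]<num:
--             l = m+1
--         else:
--             h = m
--     # if lst[l] == num:
--     #     return lst[l-1]
--     lst.insert(l,num)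
--     return lst[l-1]
-- ===== SOURCE B (Python) =====
-- def biInsert(lst, num):
--     i = 0
--     while i < len(lst) and lst[i] < num:
--         i += 1
--     lst.insert(i, num)
--     return 0 if i == 0 else lst[i - 1]
-- ===== Notes on version B (the rewrite author's own statement) =====
-- stated objective: simpler
-- what changed: Replaces the binary search and its three special-case branches (empty, front, past-the-end) by one uniform linear forward scan for the leftmost insertion point.
-- outside the precondition, e.g. on biInsert([1, 5, 0, 0, 5], 2): A returns 0, B returns 1
import Mathlib
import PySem

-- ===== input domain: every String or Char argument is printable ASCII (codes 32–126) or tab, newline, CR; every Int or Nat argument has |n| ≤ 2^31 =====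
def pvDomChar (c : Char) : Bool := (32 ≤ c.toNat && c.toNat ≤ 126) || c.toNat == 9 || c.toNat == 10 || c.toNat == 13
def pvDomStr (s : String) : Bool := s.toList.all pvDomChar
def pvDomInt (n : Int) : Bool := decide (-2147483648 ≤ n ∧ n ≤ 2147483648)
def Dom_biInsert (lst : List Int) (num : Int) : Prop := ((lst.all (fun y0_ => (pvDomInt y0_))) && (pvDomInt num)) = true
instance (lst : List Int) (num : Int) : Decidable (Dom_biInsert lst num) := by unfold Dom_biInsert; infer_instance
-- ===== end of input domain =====

-- B replaces the binary search and its special-case branches by one linear scan (simpler);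
-- both A and B insert num into lst in place, and on Pre_ (sorted input) they mutate it identically;
-- the equivalence proved here is about the return value.

-- ===== PORT A =====
-- the while loop: l, h move exactly as in A; lst.getD m 0 is exact since 0 ≤ m < lst.length here
-- fuel is only a structural-recursion totality guard: h - l strictly decreases, and the
-- initial fuel lst.length bounds it, so the fuel never runs out on the call below
def biLoop (lst : List Int) (num : Int) (fuel : Nat) (l h : Nat) : Nat :=
  match fuel with
  | 0 => l
  | fuel + 1 =>
    if l < h then
      let m := (l + h) / 2
      if lst.getD m 0 < num then biLoop lst num fuel (m + 1) h else biLoop lst num fuel l m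
    else l

def biInsert (lst : List Int) (num : Int) : Int :=
  if lst.length = 0 then 0
  else if num ≤ (PySem.List.pyGet? lst 0).getD 0 then 0      -- lst[0] >= num  (index 0 in range)
  else if (PySem.List.pyGet? lst (-1)).getD 0 < num then      -- num > lst[-1]
    (PySem.List.pyGet? (lst ++ [num]) (-2)).getD 0            -- lst.append(num); return lst[-2]
  else
    let l := biLoop lst num lst.length 0 (lst.length - 1)
    (PySem.List.pyGet? (PySem.List.insert lst (l : Int) num) ((l : Int) - 1)).getD 0
      -- lst.insert(l, num); return lst[l-1]  (1 ≤ l here, so the index is nonnegative and in range)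

-- ===== PORT B =====
-- the scan loop of Source B: i starts at 0 and is incremented while i < len(lst) and lst[i] < num
def altScan (xs : List Int) (num : Int) : Nat :=
  match xs with
  | [] => 0
  | x :: rest => if x < num then altScan rest num + 1 else 0

def biInsert_alt (lst : List Int) (num : Int) : Int :=
  let i := altScan lst num
  let lst2 := PySem.List.insert lst (i : Int) num              -- lst.insert(i, num)
  if i = 0 then 0 else (PySem.List.pyGet? lst2 ((i : Int) - 1)).getD 0

-- ===== PRECONDITION & SPEC =====
-- Pre_ requires lst to be partitioned about num (no element ≥ num before an element < num) —
-- the binary-search precondition, satisfied by every sorted list; on other inputs A still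
-- returns, but its value is an artefact of the probe sequence of its binary search.
def Pre_biInsert (lst : List Int) (num : Int) : Prop :=
  List.Pairwise (fun a b => b < num → a < num) lst
instance (lst : List Int) (num : Int) : Decidable (Pre_biInsert lst num) := by unfold Pre_biInsert; infer_instance
def pvWitness_biInsert : List Int × Int := ([1, 3, 3, 7], 4)

def Spec_biInsert (lst : List Int) (num : Int) (out : Int) : Prop := out = biInsert_alt lst num
instance (lst : List Int) (num : Int) (out : Int) : Decidable (Spec_biInsert lst num out) := by unfold Spec_biInsert; infer_instance

-- ===== CLAIM (what is proved, stated in full; the proofs are below) =====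
def Claim_equal_biInsert : Prop := ∀ (lst : List Int) (num : Int), Dom_biInsert lst num → Pre_biInsert lst num → Spec_biInsert lst num (biInsert lst num)

-- ===== LEMMAS AND PROOFS =====

lemma altScan_le_length (xs : List Int) (num : Int) : altScan xs num ≤ xs.length := by
  induction xs with
  | nil => simp [altScan]
  | cons x rest ih => simp only [altScan, List.length_cons]; split <;> omega

-- on a partitioned list, altScan is the leftmost insertion index: elements before it are < num, from it on ≥ num
lemma altScan_iff (xs : List Int) (num : Int) (hs : List.Pairwise (fun a b => b < num → a < num) xs) :
    ∀ m, m < xs.length → (xs.getD m 0 < num ↔ m < altScan xs num) := by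
  induction xs with
  | nil => intro m hm; simp at hm
  | cons x rest ih =>
    rcases List.pairwise_cons.mp hs with ⟨hx, hrest⟩
    intro m hm
    cases m with
    | zero =>
      simp only [altScan, List.getD_cons_zero]
      split <;> rename_i h
      · simp [h]
      · simp [h]
    | succ k =>
      simp only [altScan, List.getD_cons_succ]
      have hk : k < rest.length := by simpa using hm
      split <;> rename_i h
      · have := ih hrest k hk
        omega
      · constructor
        · intro hlt
          exfalso
          have : rest.getD k 0 = rest[k] := List.getD_eq_getElem rest 0 hk
          exact h (hx _ (List.getElem_mem hk) (this ▸ hlt))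
        · omega

lemma biLoop_eq (lst : List Int) (num : Int) (i : Nat)
    (H : ∀ m, m < lst.length → (lst.getD m 0 < num ↔ m < i)) :
    ∀ fuel l h, h - l ≤ fuel → l ≤ i → i ≤ h → h < lst.length → biLoop lst num fuel l h = i := by
  intro fuel
  induction fuel with
  | zero =>
    intro l h hd hl hh hlen
    simp only [biLoop]; omega
  | succ d ih =>
    intro l h hd hl hh hlen
    simp only [biLoop]
    by_cases hlh : l < h
    · simp only [hlh, if_true]
      have hm1 : l ≤ (l + h) / 2 := by omega
      have hm2 : (l + h) / 2 < h := by omega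
      by_cases hc : lst.getD ((l + h) / 2) 0 < num
      · have : (l + h) / 2 < i := (H _ (by omega)).mp hc
        simp only [hc, if_true]
        exact ih _ h (by omega) (by omega) hh hlen
      · have : ¬ ((l + h) / 2 < i) := fun hi => hc ((H _ (by omega)).mpr hi)
        simp only [hc, if_false]
        exact ih l _ (by omega) hl (by omega) (by omega)
    · simp [hlh]; omega

-- partitioned list with last element < num ⇒ the scan runs to the end
lemma altScan_eq_length (lst : List Int) (num : Int)
    (hs : List.Pairwise (fun a b => b < num → a < num) lst)
    (hne : lst ≠ []) (hlast : lst.getD (lst.length - 1) 0 < num) :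
    altScan lst num = lst.length := by
  have hlen : 0 < lst.length := List.length_pos_iff.mpr hne
  have := (altScan_iff lst num hs (lst.length - 1) (by omega)).mp hlast
  have := altScan_le_length lst num
  omega

-- ===== VERDICT (by name: the statement is the Claim_ definition above) =====
theorem biInsert_spec : Claim_equal_biInsert := by
  intro lst num _hdom hpre
  unfold Spec_biInsert biInsert biInsert_alt
  by_cases h0 : lst.length = 0
  · -- empty list: both return 0
    have : lst = [] := List.length_eq_zero_iff.mp h0
    subst this
    simp [altScan]
  · have hne : lst ≠ [] := fun h => h0 (by simp [h])
    have hlen : 0 < lst.length := List.length_pos_iff.mpr hne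
    have hget0 : (PySem.List.pyGet? lst 0).getD 0 = lst.getD 0 0 := by
      rw [PySem.List.pyGet?_zero]; rfl
    have hgetlast : (PySem.List.pyGet? lst (-1)).getD 0 = lst.getD (lst.length - 1) 0 := by
      rw [PySem.List.pyGet?_neg_one, List.getLast?_eq_getElem?]; rfl
    simp only [h0, if_false, hget0, hgetlast]
    by_cases h1 : num ≤ lst.getD 0 0
    · -- lst[0] >= num: A returns 0; B's scan stops at i = 0
      have hi : altScan lst num = 0 := by
        cases lst with
        | nil => simp at hne
        | cons x rest =>
          have : ¬ x < num := by simpa using h1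
          simp [altScan, this]
      rw [if_pos h1]
      simp [hi]
    · simp only [h1, if_false]
      have hi0 : 0 < altScan lst num := by
        have := (altScan_iff lst num hpre 0 hlen).mp (by omega)
        omega
      by_cases h2 : lst.getD (lst.length - 1) 0 < num
      · -- num > lst[-1]: A appends, B's scan runs to i = len; both return the old last element
        have hi : altScan lst num = lst.length := altScan_eq_length lst num hpre hne h2
        simp only [h2, if_true, hi]
        have hins : PySem.List.insert lst ((lst.length : Nat) : Int) num = lst ++ [num] :=
          PySem.List.insert_length lst num
        rw [hins]
        have hA : PySem.List.pyGet? (lst ++ [num]) (-2) = (lst ++ [num])[(lst ++ [num]).length - 2]? := by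
          apply PySem.List.pyGet?_neg_ofNat (lst ++ [num]) 2 (by omega) (by simp; omega)
        have hB : PySem.List.pyGet? (lst ++ [num]) ((lst.length : Int) - 1)
            = (lst ++ [num])[lst.length - 1]? := by
          have h01 : (0:Int) ≤ (lst.length : Int) - 1 := by omega
          rw [PySem.List.pyGet?_of_nonneg _ h01]
          congr 1
          omega
        rw [if_neg (by omega), hA, hB]
        congr 2
        simp
      · -- middle case: binary search and scan find the same index
        have hi1 : altScan lst num ≤ lst.length - 1 := by
          have h2' : ¬ (lst.length - 1 < altScan lst num) :=
            fun hlt => h2 ((altScan_iff lst num hpre (lst.length - 1) (by omega)).mpr hlt)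
          omega
        have hL : biLoop lst num lst.length 0 (lst.length - 1) = altScan lst num :=
          biLoop_eq lst num (altScan lst num) (altScan_iff lst num hpre) lst.length
            0 (lst.length - 1) (by omega) (by omega) hi1 (by omega)
        simp only [h2, if_false, hL]
        rw [if_neg (by omega)]
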